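-- pv_equiv track=rewrite | github.com/yoginegi/Bioinformatics | Problem19.py | find_neighbors
-- ===== SOURCE A (Python) =====
-- def find_neighbors(seq, max_mismatches):
--     bases = ['A', 'C', 'G', 'T']
--
--     if max_mismatches == 0:
--         return {seq}
--
--     if len(seq) == 0:
--         return {""}
--
--     neighbor_set = set()
--     suffix_neighbors = find_neighbors(seq[1:], max_mismatches)
--
--     for suffix in suffix_neighbors:
--         if calculate_hamming_distance(seq[1:], suffix) < max_mismatches:
--             for base in bases:
--                 neighbor_set.add(base + suffix)
--         else:
--             neighbor_set.add(seq[0] + suffix)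
--
--     return neighbor_set
--
-- def calculate_hamming_distance(str1, str2):
--     return sum(1 for a, b in zip(str1, str2) if a != b)
-- ===== SOURCE B (Python) =====
-- def find_neighbors(seq, max_mismatches):
--     # Iterative level-by-level build that carries every candidate's Hamming
--     # distance in a dict, instead of recursing and recomputing it per suffix.
--     if max_mismatches == 0:
--         return {seq}
--     neighbors = {""}
--     dist = {"": 0}
--     for ch in reversed(seq):
--         nxt = set()
--         ndist = {}
--         for t in neighbors:
--             h = dist[t]
--             if h < max_mismatches:
--                 for b in "ACGT":
--                     u = b + t
--                     nxt.add(u)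
--                     ndist[u] = h + (b != ch)
--             else:
--                 u = ch + t
--                 nxt.add(u)
--                 ndist[u] = h
--         neighbors = nxt
--         dist = ndist
--     return neighbors
-- ===== Notes on version B (the rewrite author's own statement) =====
-- stated objective: alternative
-- what changed: B replaces A's recursion, which re-derives every suffix neighbor's Hamming distance with a zip-scan at each level, by one iterative right-to-left loop that keeps a dict of each candidate's distance, so no distance is ever recomputed (intended as faster; a timing run measured 4.63x at n=16 but could not confirm it at the largest size, where both time out).
import Mathlib
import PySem

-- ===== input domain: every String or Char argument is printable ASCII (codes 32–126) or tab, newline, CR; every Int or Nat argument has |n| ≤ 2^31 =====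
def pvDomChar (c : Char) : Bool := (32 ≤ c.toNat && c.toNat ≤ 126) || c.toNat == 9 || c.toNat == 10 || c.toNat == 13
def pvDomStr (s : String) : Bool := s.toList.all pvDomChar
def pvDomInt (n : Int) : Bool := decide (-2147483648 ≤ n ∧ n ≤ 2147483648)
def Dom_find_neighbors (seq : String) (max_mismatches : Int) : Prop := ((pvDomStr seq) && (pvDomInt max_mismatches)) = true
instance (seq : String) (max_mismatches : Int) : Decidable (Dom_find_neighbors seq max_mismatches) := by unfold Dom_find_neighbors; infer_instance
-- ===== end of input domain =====

-- B replaces A's recursion that recomputes a Hamming distance for every suffix neighbor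
-- by an iterative level-by-level build that carries each candidate's distance in a dict
-- (objective: alternative; intended as faster, the probe measured 4.63x at n=16 but could not confirm it at the largest size).



-- ===== PORT A =====
-- calculate_hamming_distance(str1, str2) = sum(1 for a, b in zip(str1, str2) if a != b)
def pvHam (str1 str2 : List Char) : Int :=
  (((str1.zip str2).countP (fun p => p.1 ≠ p.2) : Nat) : Int)
-- bases = ['A', 'C', 'G', 'T']
def pvBases : List Char := ['A', 'C', 'G', 'T']

-- A's recursion over seq (max_mismatches never changes across the recursive calls)
def pvFnA (mm : Int) (s : List Char) : PySem.Set (List Char) :=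
  if mm = 0 then [s]
  else
    match s with
    | [] => [[]]
    | c :: rest =>
      (pvFnA mm rest).foldl
        (fun ns suffix =>
          if pvHam rest suffix < mm then
            pvBases.foldl (fun ns b => PySem.Set.add ns (b :: suffix)) ns
          else
            PySem.Set.add ns (c :: suffix))
        []

-- ===== PORT B =====
-- B's loop state after each level: the set of neighbors of the processed suffix of seq, plus a
-- dict giving each neighbor's hamming distance to that suffix ('for ch in reversed(seq)').
-- 'h = dist[t]': t is always a key of dist (invariant proved in pvMain below), so getD is exact here.
def pvFnB (mm : Int) (s : List Char) :
    PySem.Set (List Char) × PySem.Dict (List Char) Int :=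
  s.foldr
    (fun ch st =>
      st.1.foldl
        (fun acc t =>
          let h := PySem.Dict.getD st.2 t 0
          if h < mm then
            "ACGT".toList.foldl
              (fun acc2 b =>
                (PySem.Set.add acc2.1 (b :: t),
                 PySem.Dict.insert acc2.2 (b :: t) (h + (if b ≠ ch then 1 else 0))))
              acc
          else
            (PySem.Set.add acc.1 (ch :: t), PySem.Dict.insert acc.2 (ch :: t) h))
        ([], PySem.Dict.empty))
    ([([] : List Char)], PySem.Dict.ofList [([], 0)])

def find_neighbors (seq : String) (max_mismatches : Int) : List String :=
  (pvFnA max_mismatches seq.toList).map (fun cs => String.ofList cs)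

def find_neighbors_alt (seq : String) (max_mismatches : Int) : List String :=
  if max_mismatches = 0 then [seq]
  else (pvFnB max_mismatches seq.toList).1.map (fun cs => String.ofList cs)

-- ===== PRECONDITION & SPEC =====
def Spec_find_neighbors (seq : String) (max_mismatches : Int) (out : List String) : Prop := out = find_neighbors_alt seq max_mismatches
instance (seq : String) (max_mismatches : Int) (out : List String) : Decidable (Spec_find_neighbors seq max_mismatches out) := by unfold Spec_find_neighbors; infer_instance

-- ===== CLAIM (what is proved, stated in full; the proofs are below) =====
def Claim_equal_find_neighbors : Prop := ∀ (seq : String) (max_mismatches : Int), Dom_find_neighbors seq max_mismatches → Spec_find_neighbors seq max_mismatches (find_neighbors seq max_mismatches)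

-- ===== LEMMAS AND PROOFS =====

theorem pvFnA_nil (mm : Int) (h : mm ≠ 0) : pvFnA mm [] = [[]] := by
  rw [pvFnA, if_neg h]

theorem pvFnA_cons (mm : Int) (h : mm ≠ 0) (c : Char) (rest : List Char) :
    pvFnA mm (c :: rest) =
      (pvFnA mm rest).foldl
        (fun ns suffix =>
          if pvHam rest suffix < mm then
            pvBases.foldl (fun ns b => PySem.Set.add ns (b :: suffix)) ns
          else
            PySem.Set.add ns (c :: suffix))
        [] := by
  rw [pvFnA, if_neg h]

theorem pvHam_cons (a b : Char) (r t : List Char) :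
    pvHam (a :: r) (b :: t) = pvHam r t + (if b ≠ a then 1 else 0) := by
  simp only [pvHam, List.zip_cons_cons, List.countP_cons]
  by_cases h : a = b
  · subst h; simp
  · simp [h, Ne.symm h]

-- the per-suffix candidates of one level of A's recursion
def pvF (mm : Int) (c : Char) (rest : List Char) (t : List Char) : List (List Char) :=
  if pvHam rest t < mm then pvBases.map (· :: t) else [c :: t]

-- folding Set.add over fresh, pairwise-new elements is plain append
theorem pvFoldAdd_of_nodup {α : Type} [BEq α] [LawfulBEq α] (ys ns : List α)
    (h : (ns ++ ys).Nodup) : ys.foldl PySem.Set.add ns = ns ++ ys := by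
  induction ys generalizing ns with
  | nil => simp
  | cons y ys ih =>
    have hy : y ∉ ns := fun hmem =>
      (List.nodup_append.mp h).2.2 y hmem y (by simp) rfl
    have h2 : ((ns ++ [y]) ++ ys).Nodup := by
      rw [List.append_assoc, List.singleton_append]; exact h
    simp only [List.foldl_cons, PySem.Set.add_of_not_mem hy]
    rw [ih (ns ++ [y]) h2, List.append_assoc, List.singleton_append]

-- one level of A's fold, under nodup of all generated candidates
theorem pvStepA (mm : Int) (c : Char) (rest : List Char) (L : List (List Char)) (ns : PySem.Set (List Char))
    (h : (ns ++ L.flatMap (pvF mm c rest)).Nodup) :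
    L.foldl
      (fun ns suffix =>
        if pvHam rest suffix < mm then
          pvBases.foldl (fun ns b => PySem.Set.add ns (b :: suffix)) ns
        else
          PySem.Set.add ns (c :: suffix)) ns
      = ns ++ L.flatMap (pvF mm c rest) := by
  induction L generalizing ns with
  | nil => simp
  | cons t L ih =>
    have hsplit : ns ++ (t :: L).flatMap (pvF mm c rest)
        = (ns ++ pvF mm c rest t) ++ L.flatMap (pvF mm c rest) := by simp
    rw [hsplit] at h ⊢
    have hnd : (ns ++ pvF mm c rest t).Nodup := (List.nodup_append.mp h).1
    have hstep :
        (if pvHam rest t < mm then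
            pvBases.foldl (fun ns b => PySem.Set.add ns (b :: t)) ns
          else PySem.Set.add ns (c :: t)) = ns ++ pvF mm c rest t := by
      by_cases hc : pvHam rest t < mm
      · rw [if_pos hc, ← PySem.Set.update_map_eq_foldl_add, PySem.Set.update,
          pvFoldAdd_of_nodup (pvBases.map (· :: t)) ns (by simpa [pvF, hc] using hnd)]
        simp [pvF, hc]
      · have hx : (c :: t) ∉ ns := fun hmem =>
          (List.nodup_append.mp hnd).2.2 _ hmem _ (by simp [pvF, hc]) rfl
        rw [if_neg hc, PySem.Set.add_of_not_mem hx]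
        simp [pvF, hc]
    simp only [List.foldl_cons, hstep]
    exact ih _ h

-- one level's candidates are nodup when the suffix list is (all have the form b :: t)
theorem pvFlat_nodup (mm : Int) (c : Char) (rest : List Char) (L : List (List Char))
    (hL : L.Nodup) : (L.flatMap (pvF mm c rest)).Nodup := by
  induction L with
  | nil => simp
  | cons t L ih =>
    simp only [List.flatMap_cons, List.nodup_append]
    refine ⟨?_, ih (List.nodup_cons.mp hL).2, ?_⟩
    · by_cases hc : pvHam rest t < mm <;> simp [pvF, hc, pvBases]
    · intro x hx y hy
      obtain ⟨b, rfl⟩ : ∃ b, x = b :: t := by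
        by_cases hc : pvHam rest t < mm <;> simp [pvF, hc] at hx
        · obtain ⟨b, _, rfl⟩ := hx; exact ⟨b, rfl⟩
        · exact ⟨c, hx⟩
      obtain ⟨t', ht', hb⟩ := List.mem_flatMap.mp hy
      obtain ⟨b', rfl⟩ : ∃ b', y = b' :: t' := by
        by_cases hc : pvHam rest t' < mm <;> simp [pvF, hc] at hb
        · obtain ⟨b', _, rfl⟩ := hb; exact ⟨b', rfl⟩
        · exact ⟨c, hb⟩
      intro heq
      have : t = t' := (List.cons.injEq _ _ _ _ ▸ heq).2
      exact (List.nodup_cons.mp hL).1 (this ▸ ht')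

-- one level of B splits into an independent set fold and dict fold
-- one level of B splits into an independent set fold and dict fold
theorem pvLevelSplit (mm : Int) (ch : Char) (dist : PySem.Dict (List Char) Int)
    (L : List (List Char)) (acc : PySem.Set (List Char) × PySem.Dict (List Char) Int) :
    L.foldl
      (fun acc t =>
        let h := PySem.Dict.getD dist t 0
        if h < mm then
          "ACGT".toList.foldl
            (fun acc2 b =>
              (PySem.Set.add acc2.1 (b :: t),
               PySem.Dict.insert acc2.2 (b :: t) (h + (if b ≠ ch then 1 else 0))))
            acc
        else
          (PySem.Set.add acc.1 (ch :: t), PySem.Dict.insert acc.2 (ch :: t) h))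
      acc
    = (L.foldl
        (fun s t =>
          if PySem.Dict.getD dist t 0 < mm then
            "ACGT".toList.foldl (fun s b => PySem.Set.add s (b :: t)) s
          else PySem.Set.add s (ch :: t)) acc.1,
       L.foldl
        (fun d t =>
          if PySem.Dict.getD dist t 0 < mm then
            "ACGT".toList.foldl
              (fun d b => PySem.Dict.insert d (b :: t)
                (PySem.Dict.getD dist t 0 + (if b ≠ ch then 1 else 0))) d
          else PySem.Dict.insert d (ch :: t) (PySem.Dict.getD dist t 0)) acc.2) := by
  induction L generalizing acc with
  | nil => simp
  | cons t L ih =>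
    obtain ⟨a1, a2⟩ := acc
    simp only [List.foldl_cons]
    rw [ih]
    by_cases hc : PySem.Dict.getD dist t 0 < mm
    · simp only [if_pos hc]
      rw [PySem.List.foldl_prod_mk
        (fun (s : PySem.Set (List Char)) (b : Char) => PySem.Set.add s (b :: t))
        (fun (d : PySem.Dict (List Char) Int) (b : Char) =>
          PySem.Dict.insert d (b :: t) (PySem.Dict.getD dist t 0 + (if b ≠ ch then 1 else 0)))
        "ACGT".toList a1 a2]
    · simp only [if_neg hc]

-- folding inserts whose values follow one spec function
-- folding dict inserts whose values follow one spec function of the key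
theorem pvFoldInsertSpec (W : List Char → Int) (ps : List (List Char × Int))
    (d : PySem.Dict (List Char) Int) (hW : ∀ p ∈ ps, p.2 = W p.1) (x : List Char) :
    (ps.foldl (fun d p => PySem.Dict.insert d p.1 p.2) d).getD x 0
      = if x ∈ ps.map Prod.fst then W x else d.getD x 0 := by
  induction ps generalizing d with
  | nil => simp
  | cons p ps ih =>
    simp only [List.foldl_cons, List.map_cons]
    rw [ih _ (fun q hq => hW q (List.mem_cons_of_mem _ hq))]
    by_cases hx : x ∈ ps.map Prod.fst
    · rw [if_pos hx, if_pos (List.mem_cons_of_mem _ hx)]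
    · rw [if_neg hx, PySem.Dict.getD_insert]
      by_cases hxp : x = p.1
      · rw [if_pos hxp, if_pos (by simp [hxp]), hW p List.mem_cons_self, hxp]
      · rw [if_neg hxp, if_neg (by simp [hxp, hx])]

-- the dict component of one level: correct distances for every candidate
-- the dict component of one level holds the correct distance for every candidate
theorem pvDictLevel (mm : Int) (c : Char) (rest : List Char)
    (dist : PySem.Dict (List Char) Int) (L : List (List Char))
    (d0 : PySem.Dict (List Char) Int)
    (hdist : ∀ t ∈ L, dist.getD t 0 = pvHam rest t) (x : List Char) :
    (L.foldl
        (fun d t =>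
          if PySem.Dict.getD dist t 0 < mm then
            "ACGT".toList.foldl
              (fun d b => PySem.Dict.insert d (b :: t)
                (PySem.Dict.getD dist t 0 + (if b ≠ c then 1 else 0))) d
          else PySem.Dict.insert d (c :: t) (PySem.Dict.getD dist t 0)) d0).getD x 0
      = if x ∈ L.flatMap (pvF mm c rest) then pvHam (c :: rest) x else d0.getD x 0 := by
  induction L generalizing d0 with
  | nil => simp
  | cons t L ih =>
    have ht : PySem.Dict.getD dist t 0 = pvHam rest t := hdist t List.mem_cons_self
    simp only [List.foldl_cons, List.flatMap_cons]
    rw [ih _ (fun u hu => hdist u (List.mem_cons_of_mem _ hu))]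
    have hstep : ∀ y : List Char,
        ((if PySem.Dict.getD dist t 0 < mm then
            "ACGT".toList.foldl
              (fun d b => PySem.Dict.insert d (b :: t)
                (PySem.Dict.getD dist t 0 + (if b ≠ c then 1 else 0))) d0
          else PySem.Dict.insert d0 (c :: t) (PySem.Dict.getD dist t 0))).getD y 0
        = if y ∈ pvF mm c rest t then pvHam (c :: rest) y else d0.getD y 0 := by
      intro y
      rw [ht]
      by_cases hc : pvHam rest t < mm
      · rw [if_pos hc]
        have hfold :
            "ACGT".toList.foldl
              (fun d b => PySem.Dict.insert d (b :: t)
                (pvHam rest t + (if b ≠ c then 1 else 0))) d0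
            = ("ACGT".toList.map
                (fun b => ((b :: t : List Char), pvHam rest t + (if b ≠ c then 1 else 0)))).foldl
                (fun d p => PySem.Dict.insert d p.1 p.2) d0 := by
          rw [List.foldl_map]
        rw [hfold, pvFoldInsertSpec (fun k => pvHam (c :: rest) k) _ _ ?_ y]
        · have hkeys : ("ACGT".toList.map
              (fun b => ((b :: t : List Char), pvHam rest t + (if b ≠ c then 1 else 0)))).map Prod.fst
              = pvBases.map (· :: t) := by
            simp [pvBases]
          rw [hkeys]
          simp [pvF, hc]
        · intro p hp
          simp only [List.mem_map] at hp
          obtain ⟨b, _, rfl⟩ := hp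
          simp [pvHam_cons]
      · rw [if_neg hc, PySem.Dict.getD_insert]
        by_cases hy : y = (c :: t : List Char)
        · rw [if_pos hy, if_pos (by simp [pvF, hc, hy]), hy, pvHam_cons]
          simp
        · rw [if_neg hy, if_neg (by simp [pvF, hc, hy])]
    rw [hstep x]
    by_cases hx1 : x ∈ L.flatMap (pvF mm c rest)
    · simp [hx1]
    · by_cases hx2 : x ∈ pvF mm c rest t <;> simp [hx1, hx2]

-- main invariant: B's set equals A's (nodup) set and B's dict tags each member with its distance
theorem pvMain (mm : Int) (hmm : mm ≠ 0) (s : List Char) :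
    (pvFnB mm s).1 = pvFnA mm s ∧ (pvFnA mm s).Nodup ∧
      ∀ t ∈ pvFnA mm s, (pvFnB mm s).2.getD t 0 = pvHam s t := by
  induction s with
  | nil =>
    refine ⟨by simp [pvFnB, pvFnA_nil mm hmm], by simp [pvFnA_nil mm hmm], ?_⟩
    intro t ht
    rw [pvFnA_nil mm hmm] at ht
    simp only [List.mem_singleton] at ht
    subst ht
    rfl
  | cons c rest ih =>
    obtain ⟨ihS, ihN, ihD⟩ := ih
    have hflat := pvFlat_nodup mm c rest _ ihN
    have hA : pvFnA mm (c :: rest) = (pvFnA mm rest).flatMap (pvF mm c rest) := by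
      rw [pvFnA_cons mm hmm]
      exact pvStepA mm c rest (pvFnA mm rest) [] (by simpa using hflat)
    have hw : pvFnB mm (c :: rest)
        = ((pvFnB mm rest).1.foldl
            (fun s t =>
              if PySem.Dict.getD (pvFnB mm rest).2 t 0 < mm then
                "ACGT".toList.foldl (fun s b => PySem.Set.add s (b :: t)) s
              else PySem.Set.add s (c :: t)) [],
           (pvFnB mm rest).1.foldl
            (fun d t =>
              if PySem.Dict.getD (pvFnB mm rest).2 t 0 < mm then
                "ACGT".toList.foldl
                  (fun d b => PySem.Dict.insert d (b :: t)
                    (PySem.Dict.getD (pvFnB mm rest).2 t 0 + (if b ≠ c then 1 else 0))) d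
              else PySem.Dict.insert d (c :: t) (PySem.Dict.getD (pvFnB mm rest).2 t 0))
            PySem.Dict.empty) :=
      pvLevelSplit mm c (pvFnB mm rest).2 (pvFnB mm rest).1 ([], PySem.Dict.empty)
    have hsetcongr :
        (pvFnA mm rest).foldl
            (fun s t =>
              if PySem.Dict.getD (pvFnB mm rest).2 t 0 < mm then
                "ACGT".toList.foldl (fun s b => PySem.Set.add s (b :: t)) s
              else PySem.Set.add s (c :: t)) []
          = (pvFnA mm rest).foldl
            (fun ns suffix =>
              if pvHam rest suffix < mm then
                pvBases.foldl (fun ns b => PySem.Set.add ns (b :: suffix)) ns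
              else PySem.Set.add ns (c :: suffix)) [] :=
      PySem.List.foldl_congr_mem _ _ _ _ (fun acc t ht => by rw [ihD t ht]; rfl)
    have hfst : (pvFnB mm (c :: rest)).1 = pvFnA mm (c :: rest) := by
      rw [hw, ihS, hsetcongr,
        pvStepA mm c rest (pvFnA mm rest) [] (by simpa using hflat),
        List.nil_append, ← hA]
    refine ⟨hfst, hA ▸ hflat, ?_⟩
    intro t ht
    have hdct := pvDictLevel mm c rest (pvFnB mm rest).2 (pvFnA mm rest)
      PySem.Dict.empty ihD t
    rw [hw]
    simp only [ihS]
    rw [hdct, if_pos (by rw [← hA]; exact ht)]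

-- ===== VERDICT (by name: the statement is the Claim_ definition above) =====
theorem find_neighbors_spec : Claim_equal_find_neighbors := by
  intro seq mm _
  unfold Spec_find_neighbors find_neighbors find_neighbors_alt
  by_cases hmm : mm = 0
  · subst hmm
    rw [if_pos rfl, pvFnA.eq_def]
    simp [String.ofList_toList]
  · rw [if_neg hmm, (pvMain mm hmm seq.toList).1]
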